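-- pv_equiv track=rewrite | github.com/Karl0497/PythonScripts | digit.py | makestring
-- ===== SOURCE A (Python) =====
-- def makestring(n):
--     i=1
--     t=''
--     s=''
--     while True:
--         t+=str(i)
--         s+=t
--         if len(s)>=n:break
--         i+=1
--     return s[0:n]
--
-- n=1000
-- ===== SOURCE B (Python) =====
-- def makestring(n):
--     # Two-phase: first build the base digit string "123..." while recording the
--     # cumulative prefix lengths, then join the recorded prefixes and cut to n.
--     base = ""
--     lens = []
--     k = 1
--     total = 0
--     while True:
--         base += str(k)
--         lens.append(len(base))
--         total += len(base)
--         if total >= n: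
--             break
--         k += 1
--     out = "".join(base[:L] for L in lens)
--     return out[:n]
-- ===== Notes on version B (the rewrite author's own statement) =====
-- stated objective: alternative
-- what changed: A grows the prefix t and the output s together inside one loop; B is two-phase: it first builds only the base digit string while recording each cumulative prefix length, then reconstructs the output by joining base[:L] slices and truncating to n.
import Mathlib
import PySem

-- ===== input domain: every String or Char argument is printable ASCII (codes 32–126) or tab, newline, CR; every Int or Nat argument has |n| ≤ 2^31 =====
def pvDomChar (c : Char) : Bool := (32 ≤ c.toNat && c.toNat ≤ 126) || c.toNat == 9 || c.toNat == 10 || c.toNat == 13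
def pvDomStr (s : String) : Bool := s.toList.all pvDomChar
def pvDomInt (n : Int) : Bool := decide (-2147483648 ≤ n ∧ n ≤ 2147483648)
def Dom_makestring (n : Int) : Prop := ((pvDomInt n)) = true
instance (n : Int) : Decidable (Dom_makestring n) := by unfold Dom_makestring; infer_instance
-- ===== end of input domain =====

-- B re-implements A in two phases (build the base digit string + cumulative prefix lengths,
-- then join the recorded prefixes and cut to n) instead of A's single loop growing t and s together.


-- ===== PORT A =====
-- str(i) is never empty (cited by both loops' decreasing_by)
theorem pvToChars_len_pos (i : Int) : 0 < (PySem.Int.toChars i).length := by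
  unfold PySem.Int.toChars
  split
  · simp
  · exact Nat.length_toDigits_pos

def loopA (n i : Int) (t s : List Char) : List Char :=
  let t' := t ++ PySem.Int.toChars i
  let s' := s ++ t'
  if n ≤ (s'.length : Int) then s'
  else loopA n (i + 1) t' s'
termination_by (n - s.length).toNat
decreasing_by
  have := pvToChars_len_pos i
  simp only [t', s', List.length_append] at *
  omega

def makestring (n : Int) : String :=
  String.ofList (PySem.List.slice (loopA n 1 [] []) (some 0) (some n))

-- ===== PORT B =====
def loopB (n k : Int) (base : List Char) (lens : List Int) (total : Int) :
    List Char × List Int :=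
  let base' := base ++ PySem.Int.toChars k
  let lens' := lens ++ [(base'.length : Int)]
  let total' := total + (base'.length : Int)
  if n ≤ total' then (base', lens')
  else loopB n (k + 1) base' lens' total'
termination_by (n - total).toNat
decreasing_by
  have := pvToChars_len_pos k
  simp only [base', total', List.length_append] at *
  omega

def makestring_alt (n : Int) : String :=
  let bl := loopB n 1 [] [] 0
  String.ofList (PySem.List.slice
    (bl.2.foldl (fun a L => a ++ PySem.List.slice bl.1 none (some L)) [])
    (some 0) (some n))

-- ===== PRECONDITION & SPEC =====
def Spec_makestring (n : Int) (out : String) : Prop := out = makestring_alt n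
instance (n : Int) (out : String) : Decidable (Spec_makestring n out) := by unfold Spec_makestring; infer_instance

-- ===== CLAIM (what is proved, stated in full; the proofs are below) =====
def Claim_equal_makestring : Prop := ∀ (n : Int), Dom_makestring n → Spec_makestring n (makestring n)

-- ===== LEMMAS AND PROOFS =====
theorem pvSlice_to_of_nonneg (xs : List Char) (L : Int) (h : 0 ≤ L) :
    PySem.List.slice xs none (some L) = xs.take L.toNat := by
  have hL : L = ((L.toNat : Nat) : Int) := by omega
  rw [hL, Int.toNat_natCast, PySem.List.slice_to_natCast]

theorem pvJoinStep (t u s : List Char) (lens : List Int)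
    (hbnd : ∀ L ∈ lens, 0 ≤ L ∧ L ≤ (t.length : Int))
    (hjoin : s = lens.foldl (fun a L => a ++ PySem.List.slice t none (some L)) []) :
    (lens ++ [(((t ++ u).length : Nat) : Int)]).foldl
      (fun a L => a ++ PySem.List.slice (t ++ u) none (some L)) [] = s ++ (t ++ u) := by
  rw [List.foldl_append]
  have hpre : lens.foldl (fun a L => a ++ PySem.List.slice (t ++ u) none (some L)) []
      = lens.foldl (fun a L => a ++ PySem.List.slice t none (some L)) [] := by
    apply PySem.List.foldl_congr_mem
    intro a L hL
    have h := hbnd L hL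
    rw [pvSlice_to_of_nonneg _ _ h.1, pvSlice_to_of_nonneg _ _ h.1,
        List.take_append_of_le_length (by omega)]
  simp only [List.foldl_cons, List.foldl_nil, hpre, ← hjoin]
  rw [pvSlice_to_of_nonneg _ _ (by positivity), Int.toNat_natCast, List.take_of_length_le le_rfl]

theorem pvKey (n : Int) : ∀ (i : Int) (t s : List Char), ∀ (lens : List Int) (total : Int),
    total = (s.length : Int) →
    (∀ L ∈ lens, 0 ≤ L ∧ L ≤ (t.length : Int)) →
    s = lens.foldl (fun a L => a ++ PySem.List.slice t none (some L)) [] →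
    loopA n i t s =
      (loopB n i t lens total).2.foldl
        (fun a L => a ++ PySem.List.slice (loopB n i t lens total).1 none (some L)) [] := by
  intro i t s
  fun_induction loopA n i t s
  case case1 i t s t' s' hstop =>
    intro lens total htot hbnd hjoin
    have hc : n ≤ total + ((t ++ PySem.Int.toChars i).length : Int) := by
      simp only [t', s', List.length_append] at hstop
      simp only [List.length_append]
      push_cast at *
      omega
    rw [loopB]
    simp only [if_pos hc]
    exact (pvJoinStep t (PySem.Int.toChars i) s lens hbnd hjoin).symm
  case case2 i t s t' s' hstop ih =>
    intro lens total htot hbnd hjoin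
    have hc : ¬ n ≤ total + ((t ++ PySem.Int.toChars i).length : Int) := by
      simp only [t', s', List.length_append] at hstop
      simp only [List.length_append]
      push_cast at *
      omega
    rw [loopB]
    simp only [if_neg hc]
    apply ih
    · simp only [s', t', List.length_append]
      push_cast
      omega
    · intro L hL
      simp only [List.mem_append, List.mem_singleton] at hL
      rcases hL with h | h
      · have := hbnd L h
        simp only [t', List.length_append]
        refine ⟨this.1, by push_cast; omega⟩
      · subst h
        exact ⟨by positivity, le_rfl⟩
    · exact (pvJoinStep t (PySem.Int.toChars i) s lens hbnd hjoin).symm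

-- ===== VERDICT (by name: the statement is the Claim_ definition above) =====
theorem makestring_spec : Claim_equal_makestring := by
  intro n _
  unfold Spec_makestring makestring makestring_alt
  have h := pvKey n 1 [] [] [] 0 (by simp) (by simp) (by simp)
  simp only [h]
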